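-- pv_equiv track=rewrite | github.com/tubar02/Transformada-Wavelet | Trabalho/Processamento de Imagens/Trabalho 5/ex5.py | matriz_grad
-- ===== SOURCE A (Python) =====
-- def matriz_grad(n):
-- 	matriz = []
-- 	for i in range(n + 1):
-- 		linha = []
-- 		for j in range(n + 1):
-- 			if i < j:
-- 				linha.append(i)
-- 			else:
-- 				linha.append(j)
-- 		matriz.append(linha)
-- 	return matriz
-- ===== SOURCE B (Python) =====
-- def matriz_grad(n):
-- 	mat = []
-- 	for k in range(n + 1):
-- 		for i, row in enumerate(mat):
-- 			row.append(i)
-- 		mat.append(list(range(k + 1)))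
-- 	return mat
-- ===== Notes on version B (the rewrite author's own statement) =====
-- stated objective: alternative
-- what changed: B grows the matrix column-wise: each step appends the row index to every existing row and then appends the new row list(range(k+1)), eliminating A's per-entry i<j comparison entirely.
import Mathlib
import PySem

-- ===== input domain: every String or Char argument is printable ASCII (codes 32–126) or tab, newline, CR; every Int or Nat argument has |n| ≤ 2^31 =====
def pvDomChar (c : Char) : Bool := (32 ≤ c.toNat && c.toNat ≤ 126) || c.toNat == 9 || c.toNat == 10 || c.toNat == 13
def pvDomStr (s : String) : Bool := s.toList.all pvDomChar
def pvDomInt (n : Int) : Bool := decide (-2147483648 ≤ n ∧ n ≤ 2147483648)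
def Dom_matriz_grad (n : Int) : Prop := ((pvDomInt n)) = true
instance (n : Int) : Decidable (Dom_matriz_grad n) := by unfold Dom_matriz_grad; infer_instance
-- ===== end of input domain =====

-- B grows the matrix column-wise (append index to every existing row, then append range(k+1)) instead of A's per-entry i<j comparison; alternative decomposition, same cost.
-- ===== PORT A =====
def matriz_grad (n : Int) : List (List Int) :=
  (PySem.List.pyRange 0 (n + 1) 1).foldl
    (fun matriz i =>
      matriz ++ [(PySem.List.pyRange 0 (n + 1) 1).foldl
        (fun linha j => linha ++ [if i < j then i else j]) []])
    []

-- ===== PORT B =====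
-- one iteration of B's outer loop: extend every existing row by its own index, then add the new row
def pvColStep (mat : List (List Int)) (k : Int) : List (List Int) :=
  ((PySem.List.enumerate mat).map fun p => p.2 ++ [p.1]) ++ [PySem.List.pyRange 0 (k + 1) 1]

def matriz_grad_alt (n : Int) : List (List Int) :=
  (PySem.List.pyRange 0 (n + 1) 1).foldl pvColStep []

-- ===== PRECONDITION & SPEC =====
def Spec_matriz_grad (n : Int) (out : List (List Int)) : Prop := out = matriz_grad_alt n
instance (n : Int) (out : List (List Int)) : Decidable (Spec_matriz_grad n out) := by unfold Spec_matriz_grad; infer_instance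

-- ===== CLAIM =====
def Claim_equal_matriz_grad : Prop := ∀ (n : Int), Dom_matriz_grad n → Spec_matriz_grad n (matriz_grad n)

-- ===== LEMMAS AND PROOFS =====

def pvEntry (i j : Int) : Int := if i < j then i else j

def pvTarget (m : Int) : List (List Int) :=
  (PySem.List.pyRange 0 m 1).map fun i => (PySem.List.pyRange 0 m 1).map (pvEntry i)

theorem foldl_append_singleton {α β : Type} (f : α → β) (xs : List α) (acc : List β) :
    xs.foldl (fun l j => l ++ [f j]) acc = acc ++ xs.map f := by
  induction xs generalizing acc with
  | nil => simp
  | cons x xs ih => simp [List.foldl, ih]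

theorem matriz_grad_closed (n : Int) : matriz_grad n = pvTarget (n + 1) := by
  unfold matriz_grad pvTarget
  rw [foldl_append_singleton]
  rw [List.nil_append]
  apply List.map_congr_left
  intro i _
  rw [foldl_append_singleton]
  rw [List.nil_append]
  rfl

theorem row_last (t : Int) :
    (PySem.List.pyRange 0 (t + 1) 1).map (pvEntry t) = PySem.List.pyRange 0 (t + 1) 1 := by
  rw [List.map_congr_left (g := id), List.map_id]
  intro j hj
  rw [PySem.List.mem_pyRange_one] at hj
  simp only [pvEntry, id]
  rw [if_neg (by omega)]

theorem alt_closed (t : Nat) :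
    (PySem.List.pyRange 0 (t : Int) 1).foldl pvColStep [] = pvTarget (t : Int) := by
  induction t with
  | zero =>
    simp only [Nat.cast_zero]
    rw [PySem.List.pyRange_one_eq_nil le_rfl]
    unfold pvTarget
    rw [PySem.List.pyRange_one_eq_nil le_rfl]
    simp
  | succ t ih =>
    have hc : ((t + 1 : Nat) : Int) = (t : Int) + 1 := by push_cast; ring
    rw [hc, PySem.List.pyRange_one_succ_right (by positivity), List.foldl_append, ih]
    show pvColStep (pvTarget t) t = pvTarget ((t : Int) + 1)
    unfold pvColStep pvTarget
    rw [PySem.List.pyRange_one_succ_right (a := 0) (b := (t : Int)) (by positivity)]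
    rw [List.map_append]
    congr 1
    · -- old rows get their index appended
      rw [PySem.List.enumerate_eq_map_pyRange (d := [])]
      rw [List.map_map]
      simp only [PySem.List.len_eq, List.length_map, PySem.List.length_pyRange_one]
      have hlen : (((t : Int) - 0).toNat : Int) = (t : Int) := by omega
      rw [hlen]
      apply List.map_congr_left
      intro j hj
      rw [PySem.List.mem_pyRange_one] at hj
      simp only [Function.comp]
      rw [PySem.List.pyGetD_map_pyRange_of_nonneg _ _ _ _ hj.1 hj.2]
      rw [List.map_append]
      congr 1
      simp only [List.map_cons, List.map_nil, pvEntry]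
      rw [if_pos hj.2]
    · -- the new row is range(t+1)
      simp only [List.map_cons, List.map_nil]
      rw [← PySem.List.pyRange_one_succ_right (a := 0) (b := (t : Int)) (by positivity)]
      rw [row_last (t : Int)]

-- ===== VERDICT =====
theorem matriz_grad_spec : Claim_equal_matriz_grad := by
  intro n _
  unfold Spec_matriz_grad matriz_grad_alt
  rw [matriz_grad_closed]
  by_cases h : n + 1 ≤ 0
  · rw [PySem.List.pyRange_one_eq_nil h]
    unfold pvTarget
    rw [PySem.List.pyRange_one_eq_nil h]
    simp
  · have h1 : ((n + 1).toNat : Int) = n + 1 := by omega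
    rw [← h1, alt_closed]
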